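-- pv_equiv track=rewrite | github.com/joaocarloszucchi/T1-JoaoZucchi-e-LuisPozzebon | trab.py | NRZI
-- ===== SOURCE A (Python) =====
-- def NRZI(array, lenght):
--     nrzi = []
--     aux = 0  # houve mudança
--     for i in range(lenght):
--         if array[i] == 1:
--             if aux == 1:
--                 aux = 0
--             else:
--                 aux = 1
--         nrzi.append(aux)
--     # nrzi.append(1)
--     return nrzi, 0, "NRZI"
-- ===== SOURCE B (Python) =====
-- def NRZI(array, lenght):
--     # Collect toggle positions first (indexing so out-of-range lenght still raises
--     # IndexError), then emit the output as constant runs between consecutive toggles.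
--     toggles = [i for i in range(lenght) if array[i] == 1]
--     nrzi = []
--     prev, val = 0, 0
--     for t in toggles:
--         nrzi += [val] * (t - prev)
--         prev, val = t, 1 - val
--     nrzi += [val] * (lenght - prev)
--     return nrzi, 0, "NRZI"
-- ===== Notes on version B (the rewrite author's own statement) =====
-- stated objective: alternative
-- what changed: Instead of scanning every index with a running toggle state, B first collects the toggle positions (indices holding 1) and then builds the output as constant-value runs between consecutive toggle positions via list replication.
import Mathlib
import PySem

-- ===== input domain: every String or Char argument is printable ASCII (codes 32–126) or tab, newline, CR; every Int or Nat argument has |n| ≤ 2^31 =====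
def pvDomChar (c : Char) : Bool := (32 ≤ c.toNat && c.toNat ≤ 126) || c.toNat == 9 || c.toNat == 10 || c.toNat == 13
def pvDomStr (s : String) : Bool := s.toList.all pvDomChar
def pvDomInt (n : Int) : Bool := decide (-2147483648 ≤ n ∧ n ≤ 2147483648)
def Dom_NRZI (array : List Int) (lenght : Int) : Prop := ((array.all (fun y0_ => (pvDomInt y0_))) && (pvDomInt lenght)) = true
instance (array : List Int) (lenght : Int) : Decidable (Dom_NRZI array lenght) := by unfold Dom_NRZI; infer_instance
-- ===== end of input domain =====

-- B replaces A's per-index toggle state machine by collecting the toggle positions and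
-- emitting the output as constant-value runs between consecutive toggles (alternative decomposition, same cost).

-- ===== PORT A =====
-- array[i] is ported with pyGet?; Pre_NRZI excludes out-of-range indices where Python raises IndexError,
-- so the .getD 0 default is never reached on admitted inputs.
def NRZI (array : List Int) (lenght : Int) : List Int × Int × String :=
  let st := (PySem.List.pyRange 0 lenght 1).foldl
    (fun (st : List Int × Int) i =>
      let aux := if (PySem.List.pyGet? array i).getD 0 = 1 then
                   (if st.2 = 1 then (0 : Int) else 1)
                 else st.2
      (st.1 ++ [aux], aux))
    ([], 0)
  (st.1, 0, "NRZI")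

-- ===== PORT B =====
-- '[val] * k' with a possibly negative k is Python's empty-on-nonpositive replication: List.replicate k.toNat val.
def NRZI_alt (array : List Int) (lenght : Int) : List Int × Int × String :=
  let toggles := (PySem.List.pyRange 0 lenght 1).filter
    (fun i => (PySem.List.pyGet? array i).getD 0 == 1)
  let st := toggles.foldl
    (fun (st : List Int × Int × Int) t =>
      (st.1 ++ List.replicate (t - st.2.1).toNat st.2.2, t, 1 - st.2.2))
    ([], 0, 0)
  (st.1 ++ List.replicate (lenght - st.2.1).toNat st.2.2, 0, "NRZI")

-- ===== PRECONDITION & SPEC =====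
-- Pre_ excludes exactly the inputs where Python A raises IndexError (lenght exceeding the list length).
def Pre_NRZI (array : List Int) (lenght : Int) : Prop := lenght ≤ (array.length : Int)
instance (array : List Int) (lenght : Int) : Decidable (Pre_NRZI array lenght) := by unfold Pre_NRZI; infer_instance
def pvWitness_NRZI : List Int × Int := ([1, 0, 1], 3)
def Spec_NRZI (array : List Int) (lenght : Int) (out : List Int × Int × String) : Prop := out = NRZI_alt array lenght
instance (array : List Int) (lenght : Int) (out : List Int × Int × String) : Decidable (Spec_NRZI array lenght out) := by unfold Spec_NRZI; infer_instance

-- ===== CLAIM (what is proved, stated in full; the proofs are below) =====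
def Claim_equal_NRZI : Prop := ∀ (array : List Int) (lenght : Int), Dom_NRZI array lenght → Pre_NRZI array lenght → Spec_NRZI array lenght (NRZI array lenght)

-- ===== LEMMAS AND PROOFS =====

-- A's per-index recursion, extracted from its foldl.
def pvAseq (p : Int → Bool) : List Int → Int → List Int
  | [], _ => []
  | i :: is, aux =>
    let a := if p i then (if aux = 1 then (0 : Int) else 1) else aux
    a :: pvAseq p is a

-- B's run-building recursion over the toggle list, extracted from its foldl plus final run.
def pvBseq : List Int → Int → Int → Int → List Int
  | [], prev, val, n => List.replicate (n - prev).toNat val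
  | t :: ts, prev, val, n => List.replicate (t - prev).toNat val ++ pvBseq ts t (1 - val) n

theorem pvA_fold (p : Int → Bool) (is : List Int) : ∀ (l : List Int) (aux : Int),
    (is.foldl (fun (st : List Int × Int) i =>
      let a := if p i then (if st.2 = 1 then (0 : Int) else 1) else st.2
      (st.1 ++ [a], a)) (l, aux)).1 = l ++ pvAseq p is aux := by
  induction is with
  | nil => intro l aux; simp [pvAseq]
  | cons i is ih => intro l aux; simp [pvAseq, List.foldl, ih, List.append_assoc]

theorem pvB_fold (ts : List Int) : ∀ (l : List Int) (prev val n : Int),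
    (let st := ts.foldl (fun (st : List Int × Int × Int) t =>
        (st.1 ++ List.replicate (t - st.2.1).toNat st.2.2, t, 1 - st.2.2)) (l, prev, val)
     st.1 ++ List.replicate (n - st.2.1).toNat st.2.2) = l ++ pvBseq ts prev val n := by
  induction ts with
  | nil => intro l prev val n; simp [pvBseq]
  | cons t ts ih => intro l prev val n; simp only [pvBseq, List.foldl]; rw [← List.append_assoc]; exact ih _ _ _ _

-- Main invariant: A's scan from index i with toggle value val equals B's run construction,
-- the pending run [prev, i) carrying val.
theorem pvMain (p : Int → Bool) (n : Int) : ∀ (k : Nat) (i prev val : Int),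
    (n - i).toNat = k → prev ≤ i → i ≤ n → (val = 0 ∨ val = 1) →
    List.replicate (i - prev).toNat val ++ pvAseq p (PySem.List.pyRange i n 1) val
      = pvBseq ((PySem.List.pyRange i n 1).filter p) prev val n := by
  intro k
  induction k with
  | zero =>
    intro i prev val hk hpi hin _
    have hni : n ≤ i := by omega
    rw [PySem.List.pyRange_one_eq_nil hni]
    simp [pvAseq, pvBseq]
    omega
  | succ k ih =>
    intro i prev val hk hpi _ hval
    have hin : i < n := by omega
    rw [PySem.List.pyRange_one_cons hin]
    by_cases hp : p i
    · simp only [List.filter_cons, hp, if_pos, pvAseq, pvBseq]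
      have hflip : (if val = 1 then (0 : Int) else 1) = 1 - val := by
        rcases hval with h | h <;> simp [h]
      rw [hflip]
      have := ih (i + 1) i (1 - val) (by omega) (by omega) (by omega) (by omega)
      rw [← this]
      simp [List.replicate_succ]
    · simp only [List.filter_cons, hp, pvAseq]
      simp only [Bool.false_eq_true, if_false]
      have := ih (i + 1) prev val (by omega) (by omega) (by omega) hval
      rw [← this]
      have h1 : ((i : Int) + 1 - prev).toNat = (i - prev).toNat + 1 := by omega
      rw [h1, List.replicate_succ']
      simp [List.append_assoc]

-- ===== VERDICT (by name: the statement is the Claim_ definition above) =====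
theorem NRZI_spec : Claim_equal_NRZI := by
  intro array lenght _ _
  unfold Spec_NRZI NRZI NRZI_alt
  refine congrArg (fun l => (l, (0 : Int), "NRZI")) ?_
  set p : Int → Bool := fun i => (PySem.List.pyGet? array i).getD 0 == 1 with hp
  have hiff : ∀ i : Int, ((PySem.List.pyGet? array i).getD 0 = 1) = (p i = true) := by
    intro i; simp [hp]
  simp only [hiff]
  rw [pvA_fold p, pvB_fold]
  by_cases hn : lenght ≤ 0
  · rw [PySem.List.pyRange_one_eq_nil hn]
    simp [pvAseq, pvBseq]
    omega
  · have := pvMain p lenght (lenght - 0).toNat 0 0 0 rfl (by omega) (by omega) (Or.inl rfl)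
    simpa using this
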